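-- pv_equiv track=rewrite | github.com/AddNap/DocQuill | packages/docquill_core/docquill/renderers/field_renderer.py | _convert_word_time_format
-- ===== SOURCE A (Python) =====
-- def _convert_word_time_format(word_format: str) -> str:
--     """
--     Convert Word time format to Python strftime format.
--
--     Args:
--         word_format: Word format string (e.g., "HH:mm", "h:mm AM/PM")
--
--     Returns:
--         Python strftime format string
--     """
--     # Common Word time format mappings
--     mappings = {
--         'HH': '%H',    # 24-hour format
--         'hh': '%I',    # 12-hour format
--         'mm': '%M',    # Minutes
--         'ss': '%S',    # Seconds
--         'AM/PM': '%p', # AM/PM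
--         'am/pm': '%p', # am/pm
--     }
--
--     result = word_format
--     # Replace in order (longer patterns first)
--     for word_pattern, python_pattern in sorted(mappings.items(), key=lambda x: -len(x[0])):
--         result = result.replace(word_pattern, python_pattern)
--
--     return result
-- ===== SOURCE B (Python) =====
-- def _convert_word_time_format(word_format: str) -> str:
--     """
--     Convert Word time format to Python strftime format.
--
--     Single left-to-right scan: at each position match the longest token
--     ('AM/PM'/'am/pm' first, then the two-letter tokens) and emit its
--     strftime code, otherwise copy the character verbatim.
--     """
--     tokens = [
--         ('AM/PM', '%p'),
--         ('am/pm', '%p'),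
--         ('HH', '%H'),
--         ('hh', '%I'),
--         ('mm', '%M'),
--         ('ss', '%S'),
--     ]
--     out = []
--     i = 0
--     n = len(word_format)
--     while i < n:
--         for tok, code in tokens:
--             if word_format.startswith(tok, i):
--                 out.append(code)
--                 i += len(tok)
--                 break
--         else:
--             out.append(word_format[i])
--             i += 1
--     return ''.join(out)
-- ===== Notes on version B (the rewrite author's own statement) =====
-- stated objective: alternative
-- what changed: B replaces A's six sequential whole-string replace passes by one left-to-right greedy scan that matches the token table by position and copies unmatched characters verbatim.
import Mathlib
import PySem

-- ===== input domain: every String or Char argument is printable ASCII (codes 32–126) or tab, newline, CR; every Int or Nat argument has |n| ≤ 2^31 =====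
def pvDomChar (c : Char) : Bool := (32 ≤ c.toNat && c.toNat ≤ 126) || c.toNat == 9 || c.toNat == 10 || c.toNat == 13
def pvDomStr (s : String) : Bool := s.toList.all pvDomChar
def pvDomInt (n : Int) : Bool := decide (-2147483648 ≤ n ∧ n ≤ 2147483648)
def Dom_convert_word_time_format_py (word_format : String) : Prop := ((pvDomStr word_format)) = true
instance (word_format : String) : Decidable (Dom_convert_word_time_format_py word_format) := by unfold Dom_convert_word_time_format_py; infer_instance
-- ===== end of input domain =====

-- B replaces A's six whole-string replace passes by one left-to-right greedy scan
-- that matches the token table by position (objective: alternative single-pass decomposition).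

-- ===== PORT A =====
def convert_word_time_format_py (word_format : String) : String :=
  let mappings : List (String × String) :=
    [("HH", "%H"), ("hh", "%I"), ("mm", "%M"), ("ss", "%S"), ("AM/PM", "%p"), ("am/pm", "%p")]
  let pairs := PySem.List.sorted mappings (fun x => -(x.1.length : Int)) false
  pairs.foldl (fun res p => PySem.Str.replace res p.1 p.2) word_format

-- ===== PORT B =====
-- Source B's single scan: at each position try the tokens longest-first, emit the
-- strftime code and jump over the token on a match, otherwise copy the character.
def cwtfScan : List Char → List Char
  | [] => []
  | c :: t =>
    if ['A','M','/','P','M'].isPrefixOf (c :: t) then '%' :: 'p' :: cwtfScan (t.drop 4)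
    else if ['a','m','/','p','m'].isPrefixOf (c :: t) then '%' :: 'p' :: cwtfScan (t.drop 4)
    else if ['H','H'].isPrefixOf (c :: t) then '%' :: 'H' :: cwtfScan (t.drop 1)
    else if ['h','h'].isPrefixOf (c :: t) then '%' :: 'I' :: cwtfScan (t.drop 1)
    else if ['m','m'].isPrefixOf (c :: t) then '%' :: 'M' :: cwtfScan (t.drop 1)
    else if ['s','s'].isPrefixOf (c :: t) then '%' :: 'S' :: cwtfScan (t.drop 1)
    else c :: cwtfScan t
termination_by l => l.length
decreasing_by
  all_goals simp

def convert_word_time_format_py_alt (word_format : String) : String :=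
  String.ofList (cwtfScan word_format.toList)

-- ===== PRECONDITION & SPEC =====
def Spec_convert_word_time_format_py (word_format : String) (out : String) : Prop := out = convert_word_time_format_py_alt word_format
instance (word_format : String) (out : String) : Decidable (Spec_convert_word_time_format_py word_format out) := by unfold Spec_convert_word_time_format_py; infer_instance

-- ===== CLAIM (what is proved, stated in full; the proofs are below) =====
def Claim_equal_convert_word_time_format_py : Prop := ∀ (word_format : String), Dom_convert_word_time_format_py word_format → Spec_convert_word_time_format_py word_format (convert_word_time_format_py word_format)

-- ===== LEMMAS AND PROOFS =====

-- A structural model of Python's str.replace on char lists (leftmost, greedy).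
def rep (old nw : List Char) : List Char → List Char
  | [] => []
  | c :: t =>
    if old.isPrefixOf (c :: t) then nw ++ rep old nw (t.drop (old.length - 1))
    else c :: rep old nw t
termination_by l => l.length
decreasing_by
  all_goals simp

theorem go_eq_rep (old nw : List Char) (h : old ≠ []) :
    ∀ fuel l acc, l.length ≤ fuel →
      PySem.Chars.replace.go old nw fuel l acc = acc.reverse ++ rep old nw l := by
  have hol : 1 ≤ old.length := by
    cases old with
    | nil => exact absurd rfl h
    | cons a b => simp
  intro fuel
  induction fuel with
  | zero =>
    intro l acc hl
    have : l = [] := List.eq_nil_of_length_eq_zero (Nat.le_zero.mp hl)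
    subst this
    rw [PySem.Chars.replace.go]
    simp [rep]
  | succ n ih =>
    intro l acc hl
    match l with
    | [] =>
      rw [PySem.Chars.replace.go]
      simp [rep]
      omega
    | c :: t =>
      rw [PySem.Chars.replace.go]
      by_cases hp : old.isPrefixOf (c :: t)
      · simp only [hp, if_true]
        have hb : (List.drop old.length (c :: t)).length ≤ n := by
          simp at hl ⊢; omega
        rw [ih _ _ hb]
        have hdrop : List.drop old.length (c :: t) = t.drop (old.length - 1) := by
          cases old with
          | nil => exact absurd rfl h
          | cons a b => simp
        rw [hdrop, rep, if_pos hp]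
        simp
      · simp only [hp]
        have hb : t.length ≤ n := by simp at hl; omega
        rw [ih _ _ hb, rep, if_neg hp]
        simp

theorem replace_eq_rep (s old nw : List Char) (h : old ≠ []) :
    PySem.Chars.replace s old nw = rep old nw s := by
  unfold PySem.Chars.replace
  rw [if_neg (by simp [List.isEmpty_iff, h])]
  simpa using go_eq_rep old nw h s.length s [] le_rfl

theorem rep_nil (old nw : List Char) : rep old nw [] = [] := by rw [rep]

theorem rep_skip (old nw : List Char) (c : Char) (t : List Char)
    (h : ¬ old.isPrefixOf (c :: t)) : rep old nw (c :: t) = c :: rep old nw t := by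
  rw [rep, if_neg h]

theorem head_ne_not_prefix (hd : Char) (o' : List Char) (c : Char) (t : List Char)
    (h : hd ≠ c) : ¬ (hd :: o').isPrefixOf (c :: t) := by
  simp [List.isPrefixOf_iff_prefix, List.cons_prefix_cons, h]

theorem rep_match (d : Char) (o' nw u : List Char) :
    rep (d :: o') nw ((d :: o') ++ u) = nw ++ rep (d :: o') nw u := by
  rw [List.cons_append, rep]
  have hp : (d :: o').isPrefixOf (d :: (o' ++ u)) := by
    simp [List.isPrefixOf_iff_prefix, List.prefix_append]
  rw [if_pos hp]
  congr 2
  simp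

-- skipping over a stretch of characters none of which can start the pattern
theorem rep_pass (hd : Char) (o' nw : List Char) :
    ∀ pre v, (∀ c ∈ pre, hd ≠ c) →
      rep (hd :: o') nw (pre ++ v) = pre ++ rep (hd :: o') nw v := by
  intro pre
  induction pre with
  | nil => intro v _; simp
  | cons c p ih =>
    intro v h
    rw [List.cons_append,
        rep_skip _ _ _ _ (head_ne_not_prefix _ _ _ _ (h c List.mem_cons_self)),
        ih v (fun x hx => h x (List.mem_cons_of_mem _ hx)), List.cons_append]

-- A replacement's output starts with '%'; tokens never contain '%'; so a
-- '%'-free pattern that is a prefix of the output was already a prefix of the input.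
theorem rep_prefix_back (old : List Char) (nw : List Char) :
    ∀ q : List Char, '%' ∉ q → ∀ t, q <+: rep old ('%' :: nw) t → q <+: t := by
  intro q
  induction q with
  | nil => intro _ t _; exact List.nil_prefix
  | cons c q' ih =>
    intro hq t hpre
    match t with
    | [] =>
      rw [rep_nil] at hpre
      exact absurd (List.prefix_nil.mp hpre) (by simp)
    | d :: t' =>
      rw [rep] at hpre
      by_cases hp : old.isPrefixOf (d :: t')
      · rw [if_pos hp] at hpre
        have : c = '%' := (List.cons_prefix_cons.mp hpre).1
        exact absurd this (by intro h; exact hq (h ▸ List.mem_cons_self))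
      · rw [if_neg hp] at hpre
        obtain ⟨hcd, hq'⟩ := List.cons_prefix_cons.mp hpre
        exact List.cons_prefix_cons.mpr ⟨hcd,
          ih (fun hm => hq (List.mem_cons_of_mem _ hm)) t' hq'⟩

-- lift a "token does not match here" fact over an inner replace pass
theorem skip_lift (old nw : List Char) (hd : Char) (q : List Char) (c : Char) (t : List Char)
    (hq : '%' ∉ q) (h : ¬ (hd :: q).isPrefixOf (c :: t)) :
    ¬ (hd :: q).isPrefixOf (c :: rep old ('%' :: nw) t) := by
  intro hp
  rw [List.isPrefixOf_iff_prefix, List.cons_prefix_cons] at hp h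
  exact h ⟨hp.1, rep_prefix_back old nw q hq t hp.2⟩

-- names for the six passes, innermost (applied first) to outermost
def repChain (s : List Char) : List Char :=
  rep ['s','s'] ['%','S'] (rep ['m','m'] ['%','M'] (rep ['h','h'] ['%','I']
    (rep ['H','H'] ['%','H'] (rep ['a','m','/','p','m'] ['%','p']
      (rep ['A','M','/','P','M'] ['%','p'] s)))))

theorem rep_pass2 (hd x y : Char) (o' nw v : List Char) (h1 : hd ≠ x) (h2 : hd ≠ y) :
    rep (hd :: o') nw (x :: y :: v) = x :: y :: rep (hd :: o') nw v := by
  rw [rep_skip _ _ _ _ (head_ne_not_prefix _ _ _ _ h1),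
      rep_skip _ _ _ _ (head_ne_not_prefix _ _ _ _ h2)]

set_option maxRecDepth 8192 in
theorem repChain_eq_scan : ∀ n s, s.length ≤ n → repChain s = cwtfScan s := by
  intro n
  induction n with
  | zero =>
    intro s hs
    have : s = [] := List.eq_nil_of_length_eq_zero (Nat.le_zero.mp hs)
    subst this
    simp [repChain, rep_nil, cwtfScan]
  | succ n ih =>
    intro s hs
    match s with
    | [] => simp [repChain, rep_nil, cwtfScan]
    | c :: t =>
      rw [cwtfScan]
      by_cases h1 : (['A','M','/','P','M'] : List Char).isPrefixOf (c :: t)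
      · obtain ⟨u, hu⟩ := (List.isPrefixOf_iff_prefix.mp h1)
        have ht : ['M','/','P','M'] ++ u = t := by
          have := congrArg List.tail hu; simpa using this
        have hdrop : t.drop 4 = u := by rw [← ht]; rfl
        have hlen : t.length = u.length + 4 := by
          have := congrArg List.length ht; simp at this; omega
        rw [if_pos h1,
            hdrop,
            repChain,
            ← hu,
            rep_match 'A' ['M','/','P','M'] ['%','p'] _]
        simp only [List.cons_append, List.nil_append]
        rw [rep_pass2 'a' '%' 'p' _ _ _ (by decide) (by decide),
            rep_pass2 'H' '%' 'p' _ _ _ (by decide) (by decide),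
            rep_pass2 'h' '%' 'p' _ _ _ (by decide) (by decide),
            rep_pass2 'm' '%' 'p' _ _ _ (by decide) (by decide),
            rep_pass2 's' '%' 'p' _ _ _ (by decide) (by decide),
            show rep ['s','s'] ['%','S'] (rep ['m','m'] ['%','M'] (rep ['h','h'] ['%','I']
              (rep ['H','H'] ['%','H'] (rep ['a','m','/','p','m'] ['%','p']
                (rep ['A','M','/','P','M'] ['%','p'] u))))) = repChain u from rfl,
            ih u (by simp at hs; omega)]
      · rw [if_neg h1]
        by_cases h2 : (['a','m','/','p','m'] : List Char).isPrefixOf (c :: t)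
        · obtain ⟨u, hu⟩ := (List.isPrefixOf_iff_prefix.mp h2)
          have ht : ['m','/','p','m'] ++ u = t := by
            have := congrArg List.tail hu; simpa using this
          have hdrop : t.drop 4 = u := by rw [← ht]; rfl
          have hlen : t.length = u.length + 4 := by
            have := congrArg List.length ht; simp at this; omega
          rw [if_pos h2,
              hdrop,
              repChain,
              ← hu,
              rep_pass 'A' _ _ ['a','m','/','p','m'] _ (by simp),
              rep_match 'a' ['m','/','p','m'] ['%','p'] _]
          simp only [List.cons_append, List.nil_append]
          rw [rep_pass2 'H' '%' 'p' _ _ _ (by decide) (by decide),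
              rep_pass2 'h' '%' 'p' _ _ _ (by decide) (by decide),
              rep_pass2 'm' '%' 'p' _ _ _ (by decide) (by decide),
              rep_pass2 's' '%' 'p' _ _ _ (by decide) (by decide),
              show rep ['s','s'] ['%','S'] (rep ['m','m'] ['%','M'] (rep ['h','h'] ['%','I']
                (rep ['H','H'] ['%','H'] (rep ['a','m','/','p','m'] ['%','p']
                  (rep ['A','M','/','P','M'] ['%','p'] u))))) = repChain u from rfl,
              ih u (by simp at hs; omega)]
        · rw [if_neg h2]
          by_cases h3 : (['H','H'] : List Char).isPrefixOf (c :: t)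
          · obtain ⟨u, hu⟩ := (List.isPrefixOf_iff_prefix.mp h3)
            have ht : ['H'] ++ u = t := by
              have := congrArg List.tail hu; simpa using this
            have hdrop : t.drop 1 = u := by rw [← ht]; rfl
            have hlen : t.length = u.length + 1 := by
              have := congrArg List.length ht; simp at this; omega
            rw [if_pos h3,
                hdrop,
                repChain,
                ← hu,
                rep_pass 'A' _ _ ['H','H'] _ (by simp),
                rep_pass 'a' _ _ ['H','H'] _ (by simp),
                rep_match 'H' ['H'] ['%','H'] _]
            simp only [List.cons_append, List.nil_append]
            rw [rep_pass2 'h' '%' 'H' _ _ _ (by decide) (by decide),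
                rep_pass2 'm' '%' 'H' _ _ _ (by decide) (by decide),
                rep_pass2 's' '%' 'H' _ _ _ (by decide) (by decide),
                show rep ['s','s'] ['%','S'] (rep ['m','m'] ['%','M'] (rep ['h','h'] ['%','I']
                  (rep ['H','H'] ['%','H'] (rep ['a','m','/','p','m'] ['%','p']
                    (rep ['A','M','/','P','M'] ['%','p'] u))))) = repChain u from rfl,
                ih u (by simp at hs; omega)]
          · rw [if_neg h3]
            by_cases h4 : (['h','h'] : List Char).isPrefixOf (c :: t)
            · obtain ⟨u, hu⟩ := (List.isPrefixOf_iff_prefix.mp h4)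
              have ht : ['h'] ++ u = t := by
                have := congrArg List.tail hu; simpa using this
              have hdrop : t.drop 1 = u := by rw [← ht]; rfl
              have hlen : t.length = u.length + 1 := by
                have := congrArg List.length ht; simp at this; omega
              rw [if_pos h4,
                  hdrop,
                  repChain,
                  ← hu,
                  rep_pass 'A' _ _ ['h','h'] _ (by simp),
                  rep_pass 'a' _ _ ['h','h'] _ (by simp),
                  rep_pass 'H' _ _ ['h','h'] _ (by simp),
                  rep_match 'h' ['h'] ['%','I'] _]
              simp only [List.cons_append, List.nil_append]
              rw [rep_pass2 'm' '%' 'I' _ _ _ (by decide) (by decide),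
                  rep_pass2 's' '%' 'I' _ _ _ (by decide) (by decide),
                  show rep ['s','s'] ['%','S'] (rep ['m','m'] ['%','M'] (rep ['h','h'] ['%','I']
                    (rep ['H','H'] ['%','H'] (rep ['a','m','/','p','m'] ['%','p']
                      (rep ['A','M','/','P','M'] ['%','p'] u))))) = repChain u from rfl,
                  ih u (by simp at hs; omega)]
            · rw [if_neg h4]
              by_cases h5 : (['m','m'] : List Char).isPrefixOf (c :: t)
              · obtain ⟨u, hu⟩ := (List.isPrefixOf_iff_prefix.mp h5)
                have ht : ['m'] ++ u = t := by
                  have := congrArg List.tail hu; simpa using this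
                have hdrop : t.drop 1 = u := by rw [← ht]; rfl
                have hlen : t.length = u.length + 1 := by
                  have := congrArg List.length ht; simp at this; omega
                rw [if_pos h5,
                    hdrop,
                    repChain,
                    ← hu,
                    rep_pass 'A' _ _ ['m','m'] _ (by simp),
                    rep_pass 'a' _ _ ['m','m'] _ (by simp),
                    rep_pass 'H' _ _ ['m','m'] _ (by simp),
                    rep_pass 'h' _ _ ['m','m'] _ (by simp),
                    rep_match 'm' ['m'] ['%','M'] _]
                simp only [List.cons_append, List.nil_append]
                rw [rep_pass2 's' '%' 'M' _ _ _ (by decide) (by decide),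
                    show rep ['s','s'] ['%','S'] (rep ['m','m'] ['%','M'] (rep ['h','h'] ['%','I']
                      (rep ['H','H'] ['%','H'] (rep ['a','m','/','p','m'] ['%','p']
                        (rep ['A','M','/','P','M'] ['%','p'] u))))) = repChain u from rfl,
                    ih u (by simp at hs; omega)]
              · rw [if_neg h5]
                by_cases h6 : (['s','s'] : List Char).isPrefixOf (c :: t)
                · obtain ⟨u, hu⟩ := (List.isPrefixOf_iff_prefix.mp h6)
                  have ht : ['s'] ++ u = t := by
                    have := congrArg List.tail hu; simpa using this
                  have hdrop : t.drop 1 = u := by rw [← ht]; rfl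
                  have hlen : t.length = u.length + 1 := by
                    have := congrArg List.length ht; simp at this; omega
                  rw [if_pos h6,
                      hdrop,
                      repChain,
                      ← hu,
                      rep_pass 'A' _ _ ['s','s'] _ (by simp),
                      rep_pass 'a' _ _ ['s','s'] _ (by simp),
                      rep_pass 'H' _ _ ['s','s'] _ (by simp),
                      rep_pass 'h' _ _ ['s','s'] _ (by simp),
                      rep_pass 'm' _ _ ['s','s'] _ (by simp),
                      rep_match 's' ['s'] ['%','S'] _]
                  simp only [List.cons_append, List.nil_append]
                  rw [show rep ['s','s'] ['%','S'] (rep ['m','m'] ['%','M'] (rep ['h','h'] ['%','I']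
                        (rep ['H','H'] ['%','H'] (rep ['a','m','/','p','m'] ['%','p']
                          (rep ['A','M','/','P','M'] ['%','p'] u))))) = repChain u from rfl,
                      ih u (by simp at hs; omega)]
                · -- no token matches at this position: every pass copies c
                  rw [if_neg h6, repChain,
                      rep_skip _ _ _ _ h1,
                      rep_skip _ _ _ _ (skip_lift _ ['p'] 'a' ['m','/','p','m'] c t (by decide) h2),
                      rep_skip _ _ _ _
                        (skip_lift _ ['p'] 'H' ['H'] c _ (by decide)
                          (skip_lift _ ['p'] 'H' ['H'] c t (by decide) h3)),
                      rep_skip _ _ _ _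
                        (skip_lift _ ['H'] 'h' ['h'] c _ (by decide)
                          (skip_lift _ ['p'] 'h' ['h'] c _ (by decide)
                            (skip_lift _ ['p'] 'h' ['h'] c t (by decide) h4))),
                      rep_skip _ _ _ _
                        (skip_lift _ ['I'] 'm' ['m'] c _ (by decide)
                          (skip_lift _ ['H'] 'm' ['m'] c _ (by decide)
                            (skip_lift _ ['p'] 'm' ['m'] c _ (by decide)
                              (skip_lift _ ['p'] 'm' ['m'] c t (by decide) h5)))),
                      rep_skip _ _ _ _
                        (skip_lift _ ['M'] 's' ['s'] c _ (by decide)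
                          (skip_lift _ ['I'] 's' ['s'] c _ (by decide)
                            (skip_lift _ ['H'] 's' ['s'] c _ (by decide)
                              (skip_lift _ ['p'] 's' ['s'] c _ (by decide)
                                (skip_lift _ ['p'] 's' ['s'] c t (by decide) h6))))),
                      show rep ['s','s'] ['%','S'] (rep ['m','m'] ['%','M'] (rep ['h','h'] ['%','I']
                        (rep ['H','H'] ['%','H'] (rep ['a','m','/','p','m'] ['%','p']
                          (rep ['A','M','/','P','M'] ['%','p'] t))))) = repChain t from rfl,
                      ih t (by simp at hs; omega)]

-- glue at String level: unfold A's sorted table and six replace passes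
theorem toList_a_eq (w : String) :
    (convert_word_time_format_py w).toList = repChain w.toList := by
  have hsort : PySem.List.sorted
      [("HH", "%H"), ("hh", "%I"), ("mm", "%M"), ("ss", "%S"), ("AM/PM", "%p"), ("am/pm", "%p")]
      (fun x : String × String => -(x.1.length : Int)) false
      = [("AM/PM", "%p"), ("am/pm", "%p"), ("HH", "%H"), ("hh", "%I"), ("mm", "%M"), ("ss", "%S")] := by
    decide
  simp only [convert_word_time_format_py, hsort, List.foldl, PySem.Str.toList_replace]
  rw [replace_eq_rep _ _ _ (by decide), replace_eq_rep _ _ _ (by decide),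
      replace_eq_rep _ _ _ (by decide), replace_eq_rep _ _ _ (by decide),
      replace_eq_rep _ _ _ (by decide), replace_eq_rep _ _ _ (by decide)]
  rfl

-- ===== VERDICT (by name: the statement is the Claim_ definition above) =====
theorem convert_word_time_format_py_spec : Claim_equal_convert_word_time_format_py := by
  intro w _
  unfold Spec_convert_word_time_format_py convert_word_time_format_py_alt
  rw [← repChain_eq_scan w.toList.length w.toList le_rfl, ← toList_a_eq]
  exact String.ofList_toList.symm
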